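-- pv_equiv track=rewrite | github.com/cms-tsg-fog/RateMon | ratemon/CheckPrescales.py | isSequential
-- ===== SOURCE A (Python) =====
-- def isSequential(row,ignore):
--     seq = True
--     lastEntry=999999999999
--     for i,entry in enumerate(row):
--         if i in ignore:
--             continue
--         if entry > lastEntry and lastEntry!=0:
--             seq = False
--             break
--         lastEntry = entry
--     return seq
-- ===== SOURCE B (Python) =====
-- def isSequential(row, ignore):
--     kept = [e for i, e in enumerate(row) if i not in ignore]
--     # Split the kept values into segments, cutting right after each 0
--     # (a 0 suppresses the comparison against it). The row is sequential
--     # iff every segment is non-increasing, i.e. equals itself sorted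
--     # in descending order.
--     segs = []
--     cur = []
--     for e in kept:
--         cur.append(e)
--         if e == 0:
--             segs.append(cur)
--             cur = []
--     segs.append(cur)
--     return all(seg == sorted(seg, reverse=True) for seg in segs)
-- ===== Notes on version B (the rewrite author's own statement) =====
-- stated objective: alternative
-- what changed: Instead of a stateful early-exit scan comparing each entry to the previous kept one, B splits the kept values into segments cut after each zero (where A suppresses the comparison) and checks each segment is non-increasing by comparing it with its descending-sorted copy.
import Mathlib
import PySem

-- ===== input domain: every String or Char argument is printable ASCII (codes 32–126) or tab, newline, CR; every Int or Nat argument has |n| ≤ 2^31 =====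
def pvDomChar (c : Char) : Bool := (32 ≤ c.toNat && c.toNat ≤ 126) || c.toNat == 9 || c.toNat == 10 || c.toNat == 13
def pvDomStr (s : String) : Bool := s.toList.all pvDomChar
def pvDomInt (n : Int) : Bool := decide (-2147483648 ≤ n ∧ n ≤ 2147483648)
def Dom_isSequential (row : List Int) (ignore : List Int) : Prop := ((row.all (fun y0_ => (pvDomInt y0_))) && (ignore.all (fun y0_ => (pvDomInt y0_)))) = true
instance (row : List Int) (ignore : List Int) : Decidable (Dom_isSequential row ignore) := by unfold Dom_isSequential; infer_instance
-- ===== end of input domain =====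

-- B replaces A's stateful early-exit scan by: split the kept values into segments
-- cut after each zero, then compare each segment with its descending-sorted copy;
-- objective: alternative (a different algorithm of similar cost).

-- ===== PORT A =====
-- the for-loop with `continue`/`break`: early-exit recursion carrying lastEntry
def isSequentialLoop (pairs : List (Int × Int)) (ignore : List Int) (lastEntry : Int) : Bool :=
  match pairs with
  | [] => true
  | (i, entry) :: rest =>
    if ignore.contains i then isSequentialLoop rest ignore lastEntry
    else if entry > lastEntry && lastEntry != 0 then false
    else isSequentialLoop rest ignore entry

def isSequential (row : List Int) (ignore : List Int) : Bool :=
  isSequentialLoop (PySem.List.enumerate row) ignore 999999999999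

-- ===== PORT B =====
-- the for-loop building `segs`/`cur`, ending with segs.append(cur)
def splitSegsLoop (ks : List Int) (segs : List (List Int)) (cur : List Int) : List (List Int) :=
  match ks with
  | [] => segs ++ [cur]
  | e :: rest =>
    let cur' := cur ++ [e]
    if e == 0 then splitSegsLoop rest (segs ++ [cur']) []
    else splitSegsLoop rest segs cur'

def isSequential_alt (row : List Int) (ignore : List Int) : Bool :=
  let kept := ((PySem.List.enumerate row).filter (fun p => !(ignore.contains p.1))).map (·.2)
  (splitSegsLoop kept [] []).all (fun seg => seg == PySem.List.sorted seg (fun x => x) true)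

-- ===== PRECONDITION & SPEC =====
def Spec_isSequential (row : List Int) (ignore : List Int) (out : Bool) : Prop := out = isSequential_alt row ignore
instance (row : List Int) (ignore : List Int) (out : Bool) : Decidable (Spec_isSequential row ignore out) := by unfold Spec_isSequential; infer_instance

-- ===== CLAIM (what is proved, stated in full; the proofs are below) =====
def Claim_equal_isSequential : Prop := ∀ (row : List Int) (ignore : List Int), Dom_isSequential row ignore → Spec_isSequential row ignore (isSequential row ignore)

-- ===== LEMMAS AND PROOFS =====

-- the common characterization: adjacent-pair chain over a list of values
def chainOK : List Int → Bool
  | [] => true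
  | [_] => true
  | a :: b :: r => !(decide (b > a) && a != 0) && chainOK (b :: r)

-- A's loop over enumerate-pairs equals the chain over the kept values with the sentinel prepended
theorem loopA_eq_chain (pairs : List (Int × Int)) (ignore : List Int) (last : Int) :
    isSequentialLoop pairs ignore last
      = chainOK (last :: ((pairs.filter (fun p => !(ignore.contains p.1))).map (·.2))) := by
  induction pairs generalizing last with
  | nil => simp [isSequentialLoop, chainOK]
  | cons hd tl ih =>
    obtain ⟨i, entry⟩ := hd
    by_cases hc : i ∈ ignore
    · simp [isSequentialLoop, List.contains_eq_mem, hc, ih]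
    · by_cases hb : last < entry <;> by_cases hz : last = 0 <;>
        simp [isSequentialLoop, List.contains_eq_mem, hc, chainOK, hb, hz, ih]

-- the sentinel never triggers when every value is at most 2^31
theorem chain_sentinel (ks : List Int) (h : ∀ x ∈ ks, x ≤ 2147483648) :
    chainOK (999999999999 :: ks) = chainOK ks := by
  cases ks with
  | nil => simp [chainOK]
  | cons b r =>
    have hb : b ≤ 2147483648 := h b (by simp)
    simp only [chainOK]
    have : ¬ (999999999999 : Int) < b := by omega
    simp [this]

-- a zero head suppresses the next comparison
theorem chainOK_zero_cons (rest : List Int) : chainOK (0 :: rest) = chainOK rest := by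
  cases rest <;> simp [chainOK]

-- a segment equals its descending-sorted copy iff it is non-increasing
theorem segOK_eq_pairwise (seg : List Int) :
    (seg == PySem.List.sorted seg (fun x => x) true)
      = decide (seg.Pairwise (fun a b => b ≤ a)) := by
  by_cases hp : seg.Pairwise (fun a b => b ≤ a)
  · rw [PySem.List.sorted_rev_eq_self_of_pairwise seg (fun x => x) hp]; simp [hp]
  · simp only [hp, decide_false, beq_eq_false_iff_ne, ne_eq]
    intro he
    exact hp (by rw [he]; exact PySem.List.sorted_pairwise_rev seg (fun x => x))

-- under Pairwise (· ≥ ·) the last element is a lower bound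
theorem pairGe_getLast_le (cur : List Int) (hp : cur.Pairwise (fun a b => b ≤ a))
    (h : cur ≠ []) : ∀ x ∈ cur, cur.getLast h ≤ x := by
  induction cur with
  | nil => exact absurd rfl h
  | cons a t ih =>
    rcases List.pairwise_cons.mp hp with ⟨ha, ht⟩
    intro x hx
    rcases List.mem_cons.mp hx with rfl | hxt
    · cases t with
      | nil => simp
      | cons b u =>
        rw [List.getLast_cons (by simp)]
        exact le_trans (ih ht (by simp) _ (List.getLast_mem (by simp))) (ha _ (List.getLast_mem (by simp)))
    · have ht' : t ≠ [] := by intro he; subst he; simp at hxt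
      rw [List.getLast_cons ht']
      exact ih ht ht' x hxt

-- B's split-then-check loop computes the chain: invariant over (segs, cur)
theorem splitLoop_all (ks : List Int) (segs : List (List Int)) (cur : List Int)
    (h0 : (0:Int) ∉ cur) :
    (splitSegsLoop ks segs cur).all (fun seg => seg == PySem.List.sorted seg (fun x => x) true)
      = (segs.all (fun seg => seg == PySem.List.sorted seg (fun x => x) true)
          && decide (cur.Pairwise (fun a b => b ≤ a))
          && chainOK (cur.getLast?.toList ++ ks)) := by
  induction ks generalizing segs cur with
  | nil =>
    simp only [splitSegsLoop, List.all_append, List.all_cons, List.all_nil, segOK_eq_pairwise]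
    cases hcl : cur.getLast? with
    | none =>
      have : cur = [] := List.getLast?_eq_none_iff.mp hcl
      subst this; simp [chainOK]
    | some a => simp [chainOK]
  | cons e rest ih =>
    simp only [splitSegsLoop]
    by_cases he : e = 0
    · subst he
      simp only [beq_self_eq_true, if_pos]
      rw [ih _ [] (by simp)]
      simp only [List.all_append, List.all_cons, List.all_nil, segOK_eq_pairwise,
        List.getLast?_nil, Option.toList_none, List.nil_append, Bool.and_true]
      cases hcl : cur.getLast? with
      | none =>
        have : cur = [] := List.getLast?_eq_none_iff.mp hcl
        subst this
        simp [chainOK_zero_cons]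
      | some a =>
        have hcne : cur ≠ [] := by intro hh; subst hh; simp at hcl
        have hgl : cur.getLast hcne = a := by
          rw [List.getLast?_eq_some_getLast hcne] at hcl
          exact Option.some_inj.mp hcl
        have ha : a ∈ cur := hgl ▸ List.getLast_mem hcne
        have hane : a ≠ 0 := fun hh => h0 (hh ▸ ha)
        simp only [Option.toList_some, List.cons_append, List.nil_append]
        have h1 : chainOK (a :: 0 :: rest) = (decide (0 ≤ a) && chainOK rest) := by
          have hstep : chainOK (a :: 0 :: rest)
              = ((!(decide ((0:Int) > a) && a != 0)) && chainOK (0 :: rest)) := rfl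
          rw [hstep, chainOK_zero_cons]
          by_cases h0a : (0:Int) ≤ a <;> simp [h0a, hane]
        rw [h1]
        by_cases hp : cur.Pairwise (fun a b => b ≤ a)
        · have hiff : (cur ++ [0]).Pairwise (fun a b => b ≤ a) ↔ (0:Int) ≤ a := by
            rw [List.pairwise_append]
            constructor
            · rintro ⟨-, -, hab⟩
              exact hab a ha 0 (by simp)
            · intro h0a
              refine ⟨hp, by simp, ?_⟩
              intro x hx y hy
              simp only [List.mem_singleton] at hy; subst hy
              exact le_trans h0a (hgl ▸ pairGe_getLast_le cur hp hcne x hx)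
          by_cases h0a : (0:Int) ≤ a
          · simp [hp, hiff.mpr h0a, h0a]
          · simp [hp, hiff, h0a]
        · have hnp : ¬ (cur ++ [0]).Pairwise (fun a b => b ≤ a) := by
            rw [List.pairwise_append]; rintro ⟨hh, -, -⟩; exact hp hh
          simp [hp, hnp]
    · have he' : (e == 0) = false := by simpa using he
      rw [he', if_neg (by simp)]
      rw [ih segs (cur ++ [e]) (by
        simp only [List.mem_append, List.mem_singleton, not_or]
        exact ⟨h0, fun hh => he hh.symm⟩)]
      have hgl' : (cur ++ [e]).getLast? = some e := by simp
      rw [hgl']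
      cases hcl : cur.getLast? with
      | none =>
        have : cur = [] := List.getLast?_eq_none_iff.mp hcl
        subst this; simp
      | some a =>
        have hcne : cur ≠ [] := by intro hh; subst hh; simp at hcl
        have hgl : cur.getLast hcne = a := by
          rw [List.getLast?_eq_some_getLast hcne] at hcl
          exact Option.some_inj.mp hcl
        have ha : a ∈ cur := hgl ▸ List.getLast_mem hcne
        have hane : a ≠ 0 := fun hh => h0 (hh ▸ ha)
        simp only [Option.toList_some, List.cons_append, List.nil_append]
        have h1 : chainOK (a :: e :: rest) = (decide (e ≤ a) && chainOK (e :: rest)) := by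
          have hstep : chainOK (a :: e :: rest)
              = ((!(decide (e > a) && a != 0)) && chainOK (e :: rest)) := rfl
          rw [hstep]
          by_cases hea : e ≤ a <;> simp [hea, hane]
        rw [h1]
        by_cases hp : cur.Pairwise (fun a b => b ≤ a)
        · have hiff : (cur ++ [e]).Pairwise (fun a b => b ≤ a) ↔ e ≤ a := by
            rw [List.pairwise_append]
            constructor
            · rintro ⟨-, -, hab⟩; exact hab a ha e (by simp)
            · intro hea
              refine ⟨hp, by simp, ?_⟩
              intro x hx y hy
              simp only [List.mem_singleton] at hy; subst hy
              exact le_trans hea (hgl ▸ pairGe_getLast_le cur hp hcne x hx)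
          by_cases hea : e ≤ a
          · simp [hp, hiff.mpr hea, hea]
          · simp [hp, hiff, hea]
        · have hnp : ¬ (cur ++ [e]).Pairwise (fun a b => b ≤ a) := by
            rw [List.pairwise_append]; rintro ⟨hh, -, -⟩; exact hp hh
          simp [hp, hnp]

-- ===== VERDICT (by name: the statement is the Claim_ definition above) =====
theorem isSequential_spec : Claim_equal_isSequential := by
  intro row ignore hdom
  unfold Spec_isSequential isSequential isSequential_alt
  rw [loopA_eq_chain, splitLoop_all _ [] [] (by simp)]
  simp only [List.all_nil, List.getLast?_nil, Option.toList_none, List.nil_append,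
    Bool.true_and]
  rw [show decide (List.Pairwise (fun a b : Int => b ≤ a) []) = true from by decide]
  simp only [Bool.true_and]
  apply chain_sentinel
  intro x hx
  have hxrow : x ∈ row := by
    rcases List.mem_map.mp hx with ⟨p, hpmem, rfl⟩
    have hm := PySem.List.map_snd_enumerate row 0
    exact hm ▸ List.mem_map_of_mem (List.mem_of_mem_filter hpmem)
  simp only [Dom_isSequential, Bool.and_eq_true, List.all_eq_true] at hdom
  have hb := hdom.1 x hxrow
  simp [pvDomInt] at hb
  omega
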